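-- pv_equiv track=rewrite | github.com/shapradhan/TabMine | table_community.py | _get_max_community_id
-- ===== SOURCE A (Python) =====
-- def _get_max_community_id(partition):
--     """Retrieves the maximum community ID from the partition.
--
--     Args:
--         partition (dict): A dictionary where the keys are node identifiers
--                         and the values are integers representing community IDs.
--
--     Returns:
--         int: The maximum community ID found in the partition.
--
--     Raises:
--         ValueError: If the partition contains non-integer values.
--         TypeError: If the maximum community ID is not an integer.
--     """
--
--     # Ensure that partition stores integer values representing community IDs
--     if not all(isinstance(v, int) for v in partition.values()):
--         raise ValueError("Partition should only contain integer community IDs.")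
--
--     max_value_key = max(partition, key=partition.get)  # Get the key with the maximum value
--     max_community_id = partition[max_value_key]  # The maximum community ID should be an integer
--
--     # Check if the result is an integer, raise error if not
--     if not isinstance(max_community_id, int):
--         raise TypeError("max_community_id is expected to be an integer.")
--
--     return max_community_id
-- ===== SOURCE B (Python) =====
-- def _get_max_community_id(partition):
--     """Validate the community IDs, then obtain the maximum by sorting the
--     values ascending and taking the last element."""
--     values = list(partition.values())
--     if any(not isinstance(v, int) for v in values):
--         raise ValueError("Partition should only contain integer community IDs.")
--     return sorted(values)[-1]
-- ===== Notes on version B (the rewrite author's own statement) =====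
-- stated objective: alternative
-- what changed: A scans for the key with the maximal value via max(partition, key=partition.get) and looks that key up again; B ignores keys entirely and sorts the values ascending, returning the last element of the sorted list. Pre_ excludes the empty dict (A's max() raises ValueError, B's indexing raises IndexError) and association lists with duplicate keys, which cannot arise from a Python dict.
-- outside the precondition, e.g. on _get_max_community_id({}): A raises ValueError, B raises IndexError
import Mathlib
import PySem

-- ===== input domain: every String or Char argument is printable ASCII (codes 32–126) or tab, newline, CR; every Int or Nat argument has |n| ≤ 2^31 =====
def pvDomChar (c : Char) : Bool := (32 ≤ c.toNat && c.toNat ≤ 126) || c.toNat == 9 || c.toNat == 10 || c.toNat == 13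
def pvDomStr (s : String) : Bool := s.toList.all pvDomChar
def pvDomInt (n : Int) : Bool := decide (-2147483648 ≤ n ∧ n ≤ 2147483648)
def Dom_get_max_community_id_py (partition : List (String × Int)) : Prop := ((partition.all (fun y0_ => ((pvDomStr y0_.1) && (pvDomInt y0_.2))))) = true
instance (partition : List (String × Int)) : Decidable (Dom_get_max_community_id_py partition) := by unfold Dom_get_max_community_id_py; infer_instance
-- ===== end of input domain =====

-- B replaces A's argmax-key scan (max(partition, key=partition.get) + lookup) by
-- sorting the values and taking the last element (objective: alternative).


-- ===== PORT A =====
-- partition.get k / partition[k]: dict lookup = first match in the association list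
def pyDictGet (partition : List (String × Int)) (k : String) : Int :=
  ((partition.find? (fun p => p.1 == k)).map Prod.snd).getD 0

def get_max_community_id_py (partition : List (String × Int)) : Int :=
  -- all(isinstance(v, int) for v in partition.values()) is trivially true: values are Int
  -- max(partition, key=partition.get): first key with maximal value (none ↔ empty dict, where Python raises ValueError)
  match PySem.List.max? (partition.map Prod.fst) (fun k => pyDictGet partition k) with
  | some max_value_key => pyDictGet partition max_value_key   -- partition[max_value_key]
  | none => 0   -- unreachable under Pre_ (empty dict: max() raises ValueError)

-- ===== PORT B =====
def get_max_community_id_py_alt (partition : List (String × Int)) : Int :=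
  -- any(not isinstance(v, int) ...) is trivially false: values are Int
  -- sorted(values)[-1]
  match PySem.List.pyGet? (PySem.List.sorted (partition.map Prod.snd) (fun v => v) false) (-1) with
  | some v => v
  | none => 0   -- unreachable under Pre_ (empty dict: [-1] raises IndexError)

-- ===== PRECONDITION & SPEC =====
-- Pre_ excludes the empty dict (A's max() raises ValueError, B's [-1] raises IndexError) and
-- association lists with duplicate keys, which cannot occur as a Python dict argument at all.
def Pre_get_max_community_id_py (partition : List (String × Int)) : Prop :=
  partition ≠ [] ∧ (partition.map Prod.fst).Nodup
instance (partition : List (String × Int)) : Decidable (Pre_get_max_community_id_py partition) := by unfold Pre_get_max_community_id_py; infer_instance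
def pvWitness_get_max_community_id_py : (List (String × Int)) := [("a", 1), ("b", 2)]
def Spec_get_max_community_id_py (partition : List (String × Int)) (out : Int) : Prop := out = get_max_community_id_py_alt partition
instance (partition : List (String × Int)) (out : Int) : Decidable (Spec_get_max_community_id_py partition out) := by unfold Spec_get_max_community_id_py; infer_instance

-- ===== CLAIM =====
def Claim_equal_get_max_community_id_py : Prop := ∀ (partition : List (String × Int)), Dom_get_max_community_id_py partition → Pre_get_max_community_id_py partition → Spec_get_max_community_id_py partition (get_max_community_id_py partition)

-- ===== LEMMAS AND PROOFS =====

-- max? applied to a nonempty list is some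
theorem pv_foldl_some {α κ : Type} [LT κ] [DecidableLT κ] (key : α → κ) :
    ∀ (xs : List α) (a : α), ∃ m,
      xs.foldl (fun acc x => match acc with
        | none => some x
        | some m => if key m < key x then some x else some m) (some a) = some m := by
  intro xs
  induction xs with
  | nil => intro a; exact ⟨a, rfl⟩
  | cons x xs ih =>
    intro a
    simp only [List.foldl_cons]
    by_cases h : key a < key x
    · simpa [h] using ih x
    · simpa [h] using ih a

theorem pv_max?_isSome {α κ : Type} [LT κ] [DecidableLT κ] (key : α → κ)
    (xs : List α) (h : xs ≠ []) : ∃ m, PySem.List.max? xs key = some m := by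
  cases xs with
  | nil => exact absurd rfl h
  | cons x xs =>
    simp only [PySem.List.max?, List.foldl_cons]
    exact pv_foldl_some key xs x

-- with distinct keys, find? returns exactly the entry holding the key
theorem pv_find?_of_nodup :
    ∀ (l : List (String × Int)) (k : String) (v : Int),
      (l.map Prod.fst).Nodup → (k, v) ∈ l →
      l.find? (fun p => p.1 == k) = some (k, v) := by
  intro l
  induction l with
  | nil => intro k v _ hm; simp at hm
  | cons p l ih =>
    intro k v hnd hm
    simp only [List.map_cons, List.nodup_cons] at hnd
    rcases List.mem_cons.mp hm with h | h
    · subst h; simp [List.find?]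
    · have hne : p.1 ≠ k := by
        intro he
        exact hnd.1 (he ▸ (List.mem_map.mpr ⟨(k, v), h, rfl⟩))
      simp only [List.find?]
      rw [show (p.1 == k) = false from beq_eq_false_iff_ne.mpr hne]
      exact ih k v hnd.2 h

theorem pv_pyDictGet_of_mem (l : List (String × Int)) (k : String) (v : Int)
    (hnd : (l.map Prod.fst).Nodup) (hm : (k, v) ∈ l) : pyDictGet l k = v := by
  simp [pyDictGet, pv_find?_of_nodup l k v hnd hm]

-- in a ≤-sorted list the last element bounds every element
theorem pv_getLast_max :
    ∀ (s : List Int), s.Pairwise (· ≤ ·) → ∀ b, s.getLast? = some b → ∀ w ∈ s, w ≤ b := by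
  intro s
  induction s with
  | nil => intro _ b hb; simp at hb
  | cons x t ih =>
    intro hp b hb w hw
    cases t with
    | nil =>
      simp at hb hw
      omega
    | cons y t' =>
      rw [List.getLast?_cons_cons] at hb
      have hp' := (List.pairwise_cons.mp hp)
      rcases List.mem_cons.mp hw with he | hm
      · have hyb : y ≤ b := ih hp'.2 b hb y List.mem_cons_self
        have := hp'.1 y List.mem_cons_self
        omega
      · exact ih hp'.2 b hb w hm

-- ===== VERDICT =====
theorem get_max_community_id_py_spec : Claim_equal_get_max_community_id_py := by
  intro partition _ hpre
  obtain ⟨hne, hnd⟩ := hpre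
  unfold Spec_get_max_community_id_py
  -- A's side: the key with maximal value
  obtain ⟨k, hk⟩ := pv_max?_isSome (fun k => pyDictGet partition k) (partition.map Prod.fst)
    (by simpa using hne)
  have hkmem : k ∈ partition.map Prod.fst := PySem.List.max?_mem hk
  obtain ⟨⟨k', v⟩, hpmem, hfst⟩ := List.mem_map.mp hkmem
  have hk'k : k' = k := hfst
  subst hk'k
  have hkv : (k', v) ∈ partition := hpmem
  have hAval : pyDictGet partition k' = v := pv_pyDictGet_of_mem partition k' v hnd hkv
  -- v is the max of the values
  have hvmem : v ∈ partition.map Prod.snd := List.mem_map.mpr ⟨(k', v), hkv, rfl⟩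
  have hvmax : ∀ w ∈ partition.map Prod.snd, w ≤ v := by
    intro w hw
    obtain ⟨⟨kw, w'⟩, hwmem, hsnd⟩ := List.mem_map.mp hw
    have hw'w : w' = w := hsnd
    subst hw'w
    have hkwmem : kw ∈ partition.map Prod.fst := List.mem_map.mpr ⟨(kw, w'), hwmem, rfl⟩
    have := PySem.List.max?_isMax hk kw hkwmem
    have hwval : pyDictGet partition kw = w' :=
      pv_pyDictGet_of_mem partition kw w' hnd hwmem
    simp only at this
    rw [hwval, hAval] at this
    exact this
  -- B's side: last element of the sorted value list
  set s := PySem.List.sorted (partition.map Prod.snd) (fun v => v) false with hs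
  have hperm : s.Perm (partition.map Prod.snd) := PySem.List.sorted_perm _ _ _
  have hsne : s ≠ [] := by
    intro h
    have := hperm.length_eq
    rw [h] at this
    cases partition with
    | nil => exact hne rfl
    | cons p l => simp at this
  obtain ⟨b, hb⟩ : ∃ b, s.getLast? = some b := by
    cases hlast : s.getLast? with
    | none => exact absurd (List.getLast?_eq_none_iff.mp hlast) hsne
    | some b => exact ⟨b, rfl⟩
  have hbmem : b ∈ partition.map Prod.snd := hperm.mem_iff.mp (List.mem_of_getLast? hb)
  have hpw : s.Pairwise (· ≤ ·) := by
    have := PySem.List.sorted_pairwise (xs := partition.map Prod.snd) (key := fun v => v)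
    simpa using this
  have hvb : v ≤ b := pv_getLast_max s hpw b hb v (hperm.mem_iff.mpr hvmem)
  have hvb' : v = b := le_antisymm hvb (hvmax b hbmem)
  simp only [get_max_community_id_py, get_max_community_id_py_alt, hk, hAval, ← hs,
    PySem.List.pyGet?_neg_one, hb, hvb']
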